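-- pv_equiv track=rewrite | github.com/preke/asg_demo | asg/demo/taskDes.py | extractTopicSent
-- ===== SOURCE A (Python) =====
-- def extractTopicSent(abslist, introlist):
--     newabs = []
--     newintro = []
--     for al, il in zip(abslist, introlist):
--         newal = []
--         for a in al:
--             if "we" not in a and "paper" not in a and "We" not in a:
--                 newal.append(a)
--             else:
--                 if len(newal) > 0:
--                     newabs.append(newal)
--                     newintro.append(il)
--                     newal = []
--                 break
--     return newabs, newintro
-- ===== SOURCE B (Python) =====
-- def _firstTrigger(al):
--     for i, a in enumerate(al):
--         if "we" in a or "paper" in a or "We" in a: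
--             return i
--     return None
--
--
-- def extractTopicSent(abslist, introlist):
--     pairs = [(al[:i], il)
--              for al, il in zip(abslist, introlist)
--              for i in (_firstTrigger(al),)
--              if i]
--     return [p for p, _ in pairs], [q for _, q in pairs]
-- ===== Notes on version B (the rewrite author's own statement) =====
-- stated objective: simpler
-- what changed: Replaces the accumulate-and-break inner loop with locate-the-first-trigger-then-slice: a comprehension keeps (al[:i], il) for pairs whose first trigger index i is truthy, then unzips, instead of growing newal sentence by sentence and flushing it on break.
import Mathlib
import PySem

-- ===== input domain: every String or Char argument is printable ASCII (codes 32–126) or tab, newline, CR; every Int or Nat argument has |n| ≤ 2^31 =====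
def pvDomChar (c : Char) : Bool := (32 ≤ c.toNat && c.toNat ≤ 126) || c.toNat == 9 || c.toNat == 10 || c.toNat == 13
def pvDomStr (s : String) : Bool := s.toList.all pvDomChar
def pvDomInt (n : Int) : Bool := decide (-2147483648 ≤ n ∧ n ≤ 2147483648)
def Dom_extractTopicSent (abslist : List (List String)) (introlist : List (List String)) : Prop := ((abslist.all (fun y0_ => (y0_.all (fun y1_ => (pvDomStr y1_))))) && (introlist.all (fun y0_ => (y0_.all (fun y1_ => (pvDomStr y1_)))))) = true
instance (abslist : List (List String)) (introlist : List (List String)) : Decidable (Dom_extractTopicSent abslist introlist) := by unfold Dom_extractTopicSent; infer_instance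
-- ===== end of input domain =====

-- ===== PORT A =====
-- B differs from A by locating the first trigger index and slicing, instead of accumulating and breaking (objective: simpler).
-- inner 'for a in al' loop of A, with its break: returns the newal to flush, if any
def pvInnerA : List String → List String → Option (List String)
  | [], _ => none
  | a :: rest, newal =>
    if ¬ PySem.Str.isIn "we" a ∧ ¬ PySem.Str.isIn "paper" a ∧ ¬ PySem.Str.isIn "We" a then
      pvInnerA rest (newal ++ [a])
    else
      if newal.length > 0 then some newal else none

def pvLoopA : List (List String × List String) → List (List String) → List (List String) →
    List (List String) × List (List String)
  | [], newabs, newintro => (newabs, newintro)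
  | (al, il) :: rest, newabs, newintro =>
    match pvInnerA al [] with
    | some p => pvLoopA rest (newabs ++ [p]) (newintro ++ [il])
    | none => pvLoopA rest newabs newintro

def extractTopicSent (abslist : List (List String)) (introlist : List (List String)) : List (List String) × List (List String) :=
  pvLoopA (abslist.zip introlist) [] []

-- ===== PORT B =====
-- _firstTrigger: index of the first sentence containing "we", "paper" or "We", else None
def pvFirstTrigger : List String → Option Nat
  | [] => none
  | a :: rest =>
    if PySem.Str.isIn "we" a ∨ PySem.Str.isIn "paper" a ∨ PySem.Str.isIn "We" a then some 0
    else (pvFirstTrigger rest).map (· + 1)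

def extractTopicSent_alt (abslist : List (List String)) (introlist : List (List String)) : List (List String) × List (List String) :=
  let pairs := (abslist.zip introlist).filterMap (fun p =>
    match pvFirstTrigger p.1 with
    | some i => if i ≠ 0 then some (p.1.take i, p.2) else none
    | none => none)
  (pairs.map Prod.fst, pairs.map Prod.snd)

-- ===== PRECONDITION & SPEC =====
def Spec_extractTopicSent (abslist : List (List String)) (introlist : List (List String)) (out : List (List String) × List (List String)) : Prop := out = extractTopicSent_alt abslist introlist
instance (abslist : List (List String)) (introlist : List (List String)) (out : List (List String) × List (List String)) : Decidable (Spec_extractTopicSent abslist introlist out) := by unfold Spec_extractTopicSent; infer_instance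

-- ===== CLAIM (what is proved, stated in full; the proofs are below) =====
def Claim_equal_extractTopicSent : Prop := ∀ (abslist : List (List String)) (introlist : List (List String)), Dom_extractTopicSent abslist introlist → Spec_extractTopicSent abslist introlist (extractTopicSent abslist introlist)

-- ===== LEMMAS AND PROOFS =====

-- A's inner loop, from any accumulator, flushes acc ++ al[:first trigger index] when nonempty
theorem pvInnerA_eq (al : List String) (acc : List String) :
    pvInnerA al acc = (pvFirstTrigger al).bind (fun i =>
      if (acc ++ al.take i).length > 0 then some (acc ++ al.take i) else none) := by
  induction al generalizing acc with
  | nil => simp [pvInnerA, pvFirstTrigger]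
  | cons a rest ih =>
    rw [pvInnerA, pvFirstTrigger]
    by_cases h : PySem.Str.isIn "we" a = true ∨ PySem.Str.isIn "paper" a = true ∨ PySem.Str.isIn "We" a = true
    · have h' : ¬ (¬ PySem.Str.isIn "we" a = true ∧ ¬ PySem.Str.isIn "paper" a = true ∧ ¬ PySem.Str.isIn "We" a = true) := by tauto
      rw [if_neg h', if_pos h]
      simp
    · have h' : ¬ PySem.Str.isIn "we" a = true ∧ ¬ PySem.Str.isIn "paper" a = true ∧ ¬ PySem.Str.isIn "We" a = true := by tauto
      rw [if_pos h', if_neg h, ih]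
      cases pvFirstTrigger rest with
      | none => simp
      | some i => simp [List.take_succ_cons, List.append_assoc]

-- A's outer loop equals B's filterMap-then-unzip, from any accumulators
theorem pvLoopA_eq (pairs : List (List String × List String))
    (na ni : List (List String)) :
    pvLoopA pairs na ni =
      (na ++ (pairs.filterMap (fun p =>
        match pvFirstTrigger p.1 with
        | some i => if i ≠ 0 then some (p.1.take i, p.2) else none
        | none => none)).map Prod.fst,
       ni ++ (pairs.filterMap (fun p =>
        match pvFirstTrigger p.1 with
        | some i => if i ≠ 0 then some (p.1.take i, p.2) else none
        | none => none)).map Prod.snd) := by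
  induction pairs generalizing na ni with
  | nil => simp [pvLoopA]
  | cons p rest ih =>
    obtain ⟨al, il⟩ := p
    rw [pvLoopA, pvInnerA_eq al []]
    cases hf : pvFirstTrigger al with
    | none => simp only [Option.bind, List.filterMap_cons, hf]; exact ih na ni
    | some i =>
      by_cases hi : i = 0
      · subst hi
        simpa [List.filterMap_cons, hf] using ih na ni
      · have hal : al ≠ [] := by intro he; subst he; simp [pvFirstTrigger] at hf
        have hlen : ((([] : List String) ++ al.take i)).length > 0 := by
          cases al with
          | nil => exact absurd rfl hal
          | cons x xs => simp [List.length_take]; omega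
        simp only [Option.bind, if_pos hlen, List.filterMap_cons, hf]
        rw [if_pos hi, ih]
        simp [List.append_assoc]

-- ===== VERDICT (by name: the statement is the Claim_ definition above) =====
theorem extractTopicSent_spec : Claim_equal_extractTopicSent := by
  intro abslist introlist _
  unfold Spec_extractTopicSent extractTopicSent extractTopicSent_alt
  simpa using pvLoopA_eq (abslist.zip introlist) [] []
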